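-- pv_equiv track=rewrite | github.com/westphal-jan/peer-data | augmentation_on_disk.py | sentence_gpt_truncate
-- ===== SOURCE A (Python) =====
-- def sentence_gpt_truncate(abstracts):
--     trunc_abstracts = []
--     for abstract in abstracts:
--         split_sen = abstract.split('.')
--         if len(split_sen) >= 3:
--             trunc_abstracts.append(".".join(split_sen[:3]))
--             continue
--         else:
--             trunc_abstracts.append(abstract)
--     return trunc_abstracts
-- ===== SOURCE B (Python) =====
-- def sentence_gpt_truncate(abstracts):
--     # Single pass per abstract: find the index of the 3rd '.' directly and slice,
--     # instead of splitting into parts and joining the first three back.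
--     out = []
--     for abstract in abstracts:
--         cut = None
--         dots = 0
--         for i, ch in enumerate(abstract):
--             if ch == '.':
--                 dots += 1
--                 if dots == 3:
--                     cut = i
--                     break
--         out.append(abstract if cut is None else abstract[:cut])
--     return out
-- ===== Notes on version B (the rewrite author's own statement) =====
-- stated objective: alternative
-- what changed: Instead of splitting each abstract on '.' into a list of parts and joining the first three back together, B makes one character scan per abstract that locates the index of the 3rd period and slices the prefix, keeping the whole string when fewer than three periods exist.
import Mathlib
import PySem

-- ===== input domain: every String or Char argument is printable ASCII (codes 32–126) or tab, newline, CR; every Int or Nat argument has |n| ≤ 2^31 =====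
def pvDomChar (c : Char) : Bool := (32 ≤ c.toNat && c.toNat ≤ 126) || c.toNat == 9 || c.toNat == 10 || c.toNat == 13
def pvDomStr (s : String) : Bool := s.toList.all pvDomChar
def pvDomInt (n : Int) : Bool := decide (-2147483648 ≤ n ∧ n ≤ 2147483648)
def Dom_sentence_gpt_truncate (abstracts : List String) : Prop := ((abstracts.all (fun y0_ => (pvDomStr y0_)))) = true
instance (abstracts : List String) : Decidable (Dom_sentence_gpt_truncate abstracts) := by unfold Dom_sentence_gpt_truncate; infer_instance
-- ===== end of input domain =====

-- B replaces A's split-on-'.'-and-rejoin with a single character scan per abstract that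
-- finds the index of the 3rd period and slices the prefix (objective: alternative decomposition).


-- ===== PORT A =====
-- split_sen = abstract.split('.'); if len(split_sen) >= 3: '.'.join(split_sen[:3]) else abstract.
-- ('.split(".")' is PySem.Chars.splitOn on the characters, '".".join' is PySem.Chars.join.)
def pvTruncA (abstract : String) : String :=
  let split_sen := PySem.Chars.splitOn abstract.toList ['.']
  if 3 ≤ split_sen.length then String.ofList (PySem.Chars.join ['.'] (split_sen.take 3))
  else abstract

def sentence_gpt_truncate (abstracts : List String) : List String :=
  abstracts.foldl (fun trunc_abstracts abstract => trunc_abstracts ++ [pvTruncA abstract]) []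

-- ===== PORT B =====
-- the 'for i, ch in enumerate(abstract)' loop of Source B: scan with index i and a dot
-- counter, returning the index of the 3rd '.' (the break), or none if the loop ends.
def pvFindDot3 : List Char → Nat → Nat → Option Nat
  | [], _, _ => none
  | ch :: rest, i, dots =>
    if ch = '.' then
      if dots + 1 = 3 then some i else pvFindDot3 rest (i + 1) (dots + 1)
    else pvFindDot3 rest (i + 1) dots

-- abstract[:cut] with 0 ≤ cut ≤ len(abstract) is exactly List.take cut on the characters.
def pvTruncB (abstract : String) : String :=
  match pvFindDot3 abstract.toList 0 0 with
  | some cut => String.ofList (abstract.toList.take cut)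
  | none => abstract

def sentence_gpt_truncate_alt (abstracts : List String) : List String :=
  abstracts.foldl (fun out abstract => out ++ [pvTruncB abstract]) []

-- ===== PRECONDITION & SPEC =====
def Spec_sentence_gpt_truncate (abstracts : List String) (out : List String) : Prop := out = sentence_gpt_truncate_alt abstracts
instance (abstracts : List String) (out : List String) : Decidable (Spec_sentence_gpt_truncate abstracts out) := by unfold Spec_sentence_gpt_truncate; infer_instance

-- ===== CLAIM (what is proved, stated in full; the proofs are below) =====
def Claim_equal_sentence_gpt_truncate : Prop := ∀ (abstracts : List String), Dom_sentence_gpt_truncate abstracts → Spec_sentence_gpt_truncate abstracts (sentence_gpt_truncate abstracts)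

-- ===== LEMMAS AND PROOFS =====

-- reference spec both ports are reduced to: pure structural splitting of a char list at '.'
def pvParts : List Char → List (List Char)
  | [] => [[]]
  | c :: cs =>
    if c = '.' then [] :: pvParts cs
    else match pvParts cs with
      | p :: ps => (c :: p) :: ps
      | [] => [[c]]

theorem pvParts_ne_nil (l : List Char) : pvParts l ≠ [] := by
  cases l with
  | nil => simp [pvParts]
  | cons c cs =>
    simp only [pvParts]
    split_ifs
    · simp
    · cases h : pvParts cs <;> simp

theorem pvSplitOn_go_dot (l : List Char) : ∀ (fuel : Nat) (cur : List Char) (acc : List (List Char)),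
    l.length ≤ fuel →
    PySem.Chars.splitOn.go ['.'] fuel l cur acc =
      acc.reverse ++ (match pvParts l with
        | p :: ps => (cur.reverse ++ p) :: ps
        | [] => [cur.reverse]) := by
  induction l with
  | nil =>
    intro fuel cur acc _
    cases fuel <;> simp [PySem.Chars.splitOn.go, pvParts]
  | cons c cs ih =>
    intro fuel cur acc hf
    cases fuel with
    | zero => simp at hf
    | succ f =>
      simp only [List.length_cons, Nat.succ_le_succ_iff] at hf
      by_cases hc : c = '.'
      · subst hc
        rw [show PySem.Chars.splitOn.go ['.'] (f+1) ('.' :: cs) cur acc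
              = PySem.Chars.splitOn.go ['.'] f cs [] (cur.reverse :: acc) by
            simp [PySem.Chars.splitOn.go, List.isPrefixOf]]
        rw [ih f [] (cur.reverse :: acc) hf]
        simp only [pvParts]
        cases h : pvParts cs with
        | nil => exact absurd h (pvParts_ne_nil cs)
        | cons p ps => simp
      · rw [show PySem.Chars.splitOn.go ['.'] (f+1) (c :: cs) cur acc
              = PySem.Chars.splitOn.go ['.'] f cs (c :: cur) acc by
            simp only [PySem.Chars.splitOn.go, List.isPrefixOf, Bool.and_true]
            rw [if_neg (fun h : ('.' == c) = true => hc (beq_iff_eq.mp h).symm)]]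
        rw [ih f (c :: cur) acc hf]
        simp only [pvParts, if_neg hc]
        cases h : pvParts cs with
        | nil => exact absurd h (pvParts_ne_nil cs)
        | cons p ps => simp

theorem pvSplitOn_eq_parts (l : List Char) : PySem.Chars.splitOn l ['.'] = pvParts l := by
  rw [PySem.Chars.splitOn, pvSplitOn_go_dot l (l.length+1) [] [] (by omega)]
  cases h : pvParts l with
  | nil => exact absurd h (pvParts_ne_nil l)
  | cons p ps => simp

theorem pvJoin_parts (l : List Char) : PySem.Chars.join ['.'] (pvParts l) = l := by
  induction l with
  | nil => simp [pvParts, PySem.Chars.join, List.intercalate]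
  | cons c cs ih =>
    cases h : pvParts cs with
    | nil => exact absurd h (pvParts_ne_nil cs)
    | cons p ps =>
      rw [h] at ih
      by_cases hc : c = '.'
      · subst hc
        rw [show pvParts ('.' :: cs) = [] :: p :: ps by simp [pvParts, h]]
        rw [PySem.Chars.join_cons_cons, ih]
        simp
      · rw [show pvParts (c :: cs) = (c :: p) :: ps by simp [pvParts, h, hc]]
        cases ps with
        | nil =>
          rw [PySem.Chars.join_singleton] at ih ⊢
          simp [ih]
        | cons q qs =>
          rw [PySem.Chars.join_cons_cons] at ih ⊢
          simp [← ih]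

theorem pvFindDot3_spec (l : List Char) : ∀ (i dots : Nat), dots < 3 →
    (match pvFindDot3 l i dots with
      | none => (pvParts l).length + dots ≤ 3
      | some j => i ≤ j ∧ PySem.Chars.join ['.'] ((pvParts l).take (3 - dots)) = l.take (j - i)
          ∧ 3 < (pvParts l).length + dots) := by
  induction l with
  | nil =>
    intro i dots hd
    simp [pvFindDot3, pvParts]; omega
  | cons c cs ih =>
    intro i dots hd
    cases h : pvParts cs with
    | nil => exact absurd h (pvParts_ne_nil cs)
    | cons p ps =>
      by_cases hc : c = '.'
      · subst hc
        rw [show pvParts ('.' :: cs) = [] :: p :: ps by simp [pvParts, h]]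
        by_cases h3 : dots + 1 = 3
        · rw [show pvFindDot3 ('.' :: cs) i dots = some i by simp [pvFindDot3, h3]]
          refine ⟨le_refl i, ?_, by simp; omega⟩
          rw [show 3 - dots = 1 by omega]
          simp [PySem.Chars.join_singleton]
        · rw [show pvFindDot3 ('.' :: cs) i dots = pvFindDot3 cs (i+1) (dots+1) by
            simp [pvFindDot3, h3]]
          have := ih (i+1) (dots+1) (by omega)
          rw [h] at this
          cases hf : pvFindDot3 cs (i+1) (dots+1) with
          | none =>
            rw [hf] at this; simp at this ⊢; omega
          | some j =>
            rw [hf] at this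
            obtain ⟨hij, hjoin, hlen⟩ := this
            refine ⟨by omega, ?_, by simp at hlen ⊢; omega⟩
            rw [show 3 - dots = (3 - (dots+1)) + 1 by omega]
            rw [List.take_succ_cons]
            have hne : (p :: ps).take (3 - (dots + 1)) ≠ [] := by
              have : 1 ≤ 3 - (dots + 1) := by omega
              simp [List.take_eq_nil_iff]; omega
            cases hq : (p :: ps).take (3 - (dots + 1)) with
            | nil => exact absurd hq hne
            | cons q qs =>
              rw [hq] at hjoin
              rw [PySem.Chars.join_cons_cons]
              rw [hjoin]
              rw [show j - i = (j - (i+1)) + 1 by omega]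
              simp
      · rw [show pvParts (c :: cs) = (c :: p) :: ps by simp [pvParts, h, hc]]
        rw [show pvFindDot3 (c :: cs) i dots = pvFindDot3 cs (i+1) dots by simp [pvFindDot3, hc]]
        have := ih (i+1) dots hd
        rw [h] at this
        cases hf : pvFindDot3 cs (i+1) dots with
        | none => rw [hf] at this; simp at this ⊢; omega
        | some j =>
          rw [hf] at this
          obtain ⟨hij, hjoin, hlen⟩ := this
          refine ⟨by omega, ?_, by simp at hlen ⊢; omega⟩
          have h1 : 1 ≤ 3 - dots := by omega
          rw [show 3 - dots = (3 - dots - 1) + 1 by omega] at hjoin ⊢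
          rw [List.take_succ_cons] at hjoin ⊢
          rw [show j - i = (j - (i+1)) + 1 by omega, List.take_succ_cons]
          cases hq : ps.take (3 - dots - 1) with
          | nil =>
            rw [hq] at hjoin
            rw [PySem.Chars.join_singleton] at hjoin ⊢
            simp [hjoin]
          | cons q qs =>
            rw [hq] at hjoin
            rw [PySem.Chars.join_cons_cons] at hjoin ⊢
            simp [← hjoin]

theorem pvTrunc_eq (abstract : String) : pvTruncA abstract = pvTruncB abstract := by
  unfold pvTruncA pvTruncB
  rw [pvSplitOn_eq_parts]
  have hs := pvFindDot3_spec abstract.toList 0 0 (by omega)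
  cases hf : pvFindDot3 abstract.toList 0 0 with
  | none =>
    rw [hf] at hs
    simp only [Nat.add_zero] at hs
    by_cases h3 : 3 ≤ (pvParts abstract.toList).length
    · rw [if_pos h3]
      rw [List.take_of_length_le (by omega)]
      rw [pvJoin_parts]
      simp
    · rw [if_neg h3]
  | some j =>
    rw [hf] at hs
    obtain ⟨-, hjoin, hlen⟩ := hs
    rw [if_pos (by omega)]
    simp only [Nat.sub_zero] at hjoin
    rw [hjoin]

-- ===== VERDICT (by name: the statement is the Claim_ definition above) =====
theorem sentence_gpt_truncate_spec : Claim_equal_sentence_gpt_truncate := by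
  intro abstracts _
  unfold Spec_sentence_gpt_truncate sentence_gpt_truncate sentence_gpt_truncate_alt
  simp only [pvTrunc_eq]
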